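-- pv_equiv track=rewrite | github.com/birc-gsa-2022/project-1-python-ms-world-wides | src/lin.py | lin_runner
-- ===== SOURCE A (Python) =====
-- def border_algo(x,p):
--     #edge case
--     if p == "" or x == "":
--         return []
--     #crate string
--     jointSeq = '$'.join((p,x))
--     #built border array
--     ba = [0]*len(jointSeq)
--
--     #otherwise run trough seq
--     for i in range(1, len(jointSeq)):
--         b = ba[i-1]
--         #extend border
--         while (b > 0) and (jointSeq[i] != jointSeq[b]):
--             b = ba[b-1]
--         #if matches
--         if(jointSeq[i]==jointSeq[b]):
--             ba[i] = b + 1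
--         else:
--             ba[i] = 0
--
--     #filter matches with length of pattern
--     result = []
--     for i in range(0, len(x)):
--         border_length = ba[i+len(p)+1] # ba[j]
--         if border_length == len(p):
--             result.append(i-len(p)+2) # does this work?
--     return result
--
-- def output(x_name, p_name, i, p):
--     return '\t'.join([p_name, x_name, str(i), f'{str(len(p))}M', p])
--
-- def lin_runner(fasta_dict, fastq_dict):
--
--     string = ''
--     for p_key, p_val in fastq_dict.items():
--         for x_key, x_val in fasta_dict.items():
--             matches = border_algo(x_val, p_val)
--             for i in matches:
--                 string += output(x_key, p_key, i, p_val) + '\n'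
--
--     return string
-- ===== SOURCE B (Python) =====
-- def longest_border(js, j):
--     # length of the longest proper border of js[:j+1], found by direct scan
--     b = j
--     while b > 0 and js[:b] != js[j - b + 1:j + 1]:
--         b -= 1
--     return b
--
-- def lin_match(x, p):
--     if p == "" or x == "":
--         return []
--     js = p + '$' + x
--     m = len(p)
--     return [j - 2 * m + 1 for j in range(m + 1, len(js)) if longest_border(js, j) == m]
--
-- def lin_runner(fasta_dict, fastq_dict):
--     lines = ['\t'.join([p_key, x_key, str(i), str(len(p_val)) + 'M', p_val]) + '\n'
--              for p_key, p_val in fastq_dict.items()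
--              for x_key, x_val in fasta_dict.items()
--              for i in lin_match(x_val, p_val)]
--     return ''.join(lines)
-- ===== Notes on version B (the rewrite author's own statement) =====
-- stated objective: simpler
-- what changed: The KMP-style incremental failure-link loop that builds the border array of p+'$'+x is replaced by a direct per-position longest-border scan (slice comparison, scanning candidate lengths downward), and the nested loops accumulating the output with string += are replaced by one comprehension joined once.
import Mathlib
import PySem

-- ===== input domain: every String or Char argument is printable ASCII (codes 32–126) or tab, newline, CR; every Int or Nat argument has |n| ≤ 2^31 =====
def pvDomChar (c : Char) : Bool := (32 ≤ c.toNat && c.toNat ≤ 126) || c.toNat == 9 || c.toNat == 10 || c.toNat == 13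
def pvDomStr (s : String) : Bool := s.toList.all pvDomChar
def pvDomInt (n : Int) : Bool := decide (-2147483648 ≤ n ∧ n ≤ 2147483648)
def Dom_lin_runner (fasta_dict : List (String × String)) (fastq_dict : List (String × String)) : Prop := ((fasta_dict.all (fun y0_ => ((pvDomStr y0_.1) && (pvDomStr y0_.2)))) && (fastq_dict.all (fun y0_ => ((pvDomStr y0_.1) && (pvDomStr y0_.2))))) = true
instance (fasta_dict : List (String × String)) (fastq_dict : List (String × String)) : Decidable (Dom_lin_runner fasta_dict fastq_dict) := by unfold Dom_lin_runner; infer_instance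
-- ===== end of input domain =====

-- B replaces A's incremental failure-link (KMP) computation of the border array of p+'$'+x by a
-- direct per-position longest-border scan, and builds the output with one join over comprehensions
-- instead of string +=: simpler to read, same return value on every input (no argument is mutated).

-- ===== PORT A =====
-- the inner "while (b > 0) and (jointSeq[i] != jointSeq[b]): b = ba[b-1]" loop of border_algo;
-- fuel only makes the recursion structural: in every state the loop actually reaches, ba[b-1] < b,
-- so fuel = b.toNat iterations are enough and the port computes exactly what the Python loop does
-- (established by pvBorderWhile_spec below)
def pvBorderWhile (jointSeq : List Char) (ba : List Int) (ci : Char) : Nat → Int → Int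
  | 0, b => b
  | fuel + 1, b =>
    if b > 0 ∧ PySem.List.pyGetD jointSeq b ' ' ≠ ci then
      pvBorderWhile jointSeq ba ci fuel (PySem.List.pyGetD ba (b - 1) 0)
    else b

def pv_border_algo (x p : List Char) : List Int :=
  if p = [] ∨ x = [] then []
  else
    let jointSeq := PySem.Chars.join ['$'] [p, x]
    let ba0 : List Int := List.replicate jointSeq.length 0
    let ba := (PySem.List.pyRange 1 (jointSeq.length : Int) 1).foldl (fun ba i =>
      let b := PySem.List.pyGetD ba (i - 1) 0
      let ci := PySem.List.pyGetD jointSeq i ' '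
      let b := pvBorderWhile jointSeq ba ci b.toNat b
      if ci = PySem.List.pyGetD jointSeq b ' ' then PySem.List.pySetD ba i (b + 1)
      else PySem.List.pySetD ba i 0) ba0
    (PySem.List.pyRange 0 (x.length : Int) 1).foldl (fun result i =>
      let border_length := PySem.List.pyGetD ba (i + p.length + 1) 0
      if border_length = (p.length : Int) then result ++ [i - p.length + 2] else result) []

def pv_output (x_name p_name : List Char) (i : Int) (p : List Char) : List Char :=
  PySem.Chars.join ['\t'] [p_name, x_name, PySem.Int.toChars i, PySem.Int.toChars p.length ++ ['M'], p]

def lin_runner (fasta_dict : List (String × String)) (fastq_dict : List (String × String)) : String :=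
  let fasta := PySem.Dict.ofList fasta_dict
  let fastq := PySem.Dict.ofList fastq_dict
  String.ofList ((fastq.items).foldl (fun s pkv =>
    (fasta.items).foldl (fun s xkv =>
      (pv_border_algo xkv.2.toList pkv.2.toList).foldl (fun s i =>
        s ++ pv_output xkv.1.toList pkv.1.toList i pkv.2.toList ++ ['\n']) s) s) [])

-- ===== PORT B =====
-- the "b = j; while b > 0 and js[:b] != js[j-b+1:j+1]: b -= 1; return b" loop of Source B
-- (b decreases by exactly 1 per iteration, so it is structural recursion on b)
def pvLongestBorderGo (js : List Char) (j : Int) : Nat → Int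
  | 0 => 0
  | b + 1 =>
    if PySem.List.slice js (some 0) (some ((b : Int) + 1)) ≠
       PySem.List.slice js (some (j - ((b : Int) + 1) + 1)) (some (j + 1)) then
      pvLongestBorderGo js j b
    else ((b : Int) + 1)

def pv_longest_border (js : List Char) (j : Int) : Int := pvLongestBorderGo js j j.toNat

def pv_lin_match (x p : List Char) : List Int :=
  if p = [] ∨ x = [] then []
  else
    let js := p ++ '$' :: x
    let m : Int := p.length
    ((PySem.List.pyRange (m + 1) (js.length : Int) 1).filter
        (fun j => pv_longest_border js j = m)).map (fun j => j - 2 * m + 1)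

def lin_runner_alt (fasta_dict : List (String × String)) (fastq_dict : List (String × String)) : String :=
  let fasta := PySem.Dict.ofList fasta_dict
  let fastq := PySem.Dict.ofList fastq_dict
  String.ofList (PySem.Chars.join [] ((fastq.items).flatMap (fun pkv =>
    (fasta.items).flatMap (fun xkv =>
      (pv_lin_match xkv.2.toList pkv.2.toList).map (fun i =>
        PySem.Chars.join ['\t'] [pkv.1.toList, xkv.1.toList, PySem.Int.toChars i,
          PySem.Int.toChars pkv.2.toList.length ++ ['M'], pkv.2.toList] ++ ['\n'])))))

-- ===== PRECONDITION & SPEC =====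
def Spec_lin_runner (fasta_dict : List (String × String)) (fastq_dict : List (String × String)) (out : String) : Prop := out = lin_runner_alt fasta_dict fastq_dict
instance (fasta_dict : List (String × String)) (fastq_dict : List (String × String)) (out : String) : Decidable (Spec_lin_runner fasta_dict fastq_dict out) := by unfold Spec_lin_runner; infer_instance

-- ===== CLAIM (what is proved, stated in full; the proofs are below) =====
def Claim_equal_lin_runner : Prop := ∀ (fasta_dict : List (String × String)) (fastq_dict : List (String × String)), Dom_lin_runner fasta_dict fastq_dict → Spec_lin_runner fasta_dict fastq_dict (lin_runner fasta_dict fastq_dict)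

-- ===== LEMMAS AND PROOFS =====

-- "b is a (possibly empty) border of the prefix js[:j+1] shorter than the prefix itself":
-- the first b characters equal the b characters ending at index j
abbrev PvBorder (js : List Char) (j b : Nat) : Prop :=
  b ≤ j ∧ js.take b = (js.drop (j + 1 - b)).take b

-- the length of the longest proper border of js[:j+1]
def pvMB (js : List Char) (j : Nat) : Nat := Nat.findGreatest (PvBorder js j) j

lemma pvBorder_zero (js : List Char) (j : Nat) : PvBorder js j 0 := by simp [PvBorder]

lemma pvMB_border (js : List Char) (j : Nat) : PvBorder js j (pvMB js j) :=
  Nat.findGreatest_spec (Nat.zero_le j) (pvBorder_zero js j)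

lemma pvMB_le (js : List Char) (j : Nat) : pvMB js j ≤ j := Nat.findGreatest_le j

lemma le_pvMB (js : List Char) {j b : Nat} (h : PvBorder js j b) : b ≤ pvMB js j :=
  Nat.le_findGreatest h.1 h

lemma pvBorder_getElem (js : List Char) {j b : Nat} (hb : b ≤ j) (hj : j < js.length)
    (h : js.take b = (js.drop (j + 1 - b)).take b) {k : Nat} (hk : k < b) :
    js[k]'(by omega) = js[j + 1 - b + k]'(by omega) := by
  have h' := congrArg (fun l => l[k]?) h
  simp only [List.getElem?_take, List.getElem?_drop, hk, if_pos] at h'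
  rw [List.getElem?_eq_getElem (by omega), List.getElem?_eq_getElem (by omega)] at h'
  exact Option.some.inj h'

lemma pvBorder_of_getElem (js : List Char) {j b : Nat} (hb : b ≤ j) (hj : j < js.length)
    (h : ∀ k (hk : k < b), js[k]'(by omega) = js[j + 1 - b + k]'(by omega)) :
    PvBorder js j b := by
  refine ⟨hb, ?_⟩
  apply List.ext_getElem
  · simp; omega
  · intro k hk1 hk2
    simp only [List.getElem_take, List.getElem_drop]
    have hk' : k < b ∧ k < js.length := by simpa using hk1
    have hk : k < b := hk'.1
    have := h k hk
    convert this using 2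

-- a border of a border is a border
lemma pvBorder_trans (js : List Char) {j c b : Nat} (hc : PvBorder js j c)
    (hb : PvBorder js (c - 1) b) (hcpos : 0 < c) (hj : j < js.length) : PvBorder js j b := by
  have hcj := hc.1
  have hbc := hb.1
  apply pvBorder_of_getElem js (by omega) hj
  intro k hk
  have h1 := pvBorder_getElem js hbc (by omega) hb.2 hk
  have h2 := pvBorder_getElem js hcj hj hc.2 (k := c - b + k) (by omega)
  have e1 : c - 1 + 1 - b + k = c - b + k := by omega
  have e2 : j + 1 - c + (c - b + k) = j + 1 - b + k := by omega
  simp only [e1] at h1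
  simp only [e2] at h2
  rw [h1, h2]

-- of two borders, the shorter is a border of the prefix whose length is the longer
lemma pvBorder_chain (js : List Char) {j c b : Nat} (hb : PvBorder js j b) (hc : PvBorder js j c)
    (hlt : b < c) (hj : j < js.length) : PvBorder js (c - 1) b := by
  have hcj := hc.1
  have hbj := hb.1
  apply pvBorder_of_getElem js (by omega) (by omega)
  intro k hk
  -- js[k] = js[c - b + k]
  have h1 := pvBorder_getElem js hb.1 hj hb.2 hk          -- js[k] = js[j+1-b+k]
  have h2 := pvBorder_getElem js hc.1 hj hc.2 (k := c - b + k) (by omega)  -- js[c-b+k] = js[j+1-c+(c-b+k)]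
  have e2 : j + 1 - c + (c - b + k) = j + 1 - b + k := by omega
  simp only [e2] at h2
  have e1 : c - 1 + 1 - b + k = c - b + k := by omega
  simp only [e1]
  rw [h1, ← h2]

-- extension: positive-length borders of js[:i+1] extend borders of js[:i]
lemma pvBorder_succ (js : List Char) {i b : Nat} (hi1 : 1 ≤ i) (hi : i < js.length) :
    PvBorder js i (b + 1) ↔ PvBorder js (i - 1) b ∧ js[b]? = js[i]? := by
  constructor
  · intro h
    have hb1 : b + 1 ≤ i := h.1
    have hbl : b < js.length := by omega
    constructor
    · apply pvBorder_of_getElem js (by omega) (by omega)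
      intro k hk
      have := pvBorder_getElem js h.1 hi h.2 (k := k) (by omega)
      convert this using 2
      omega
    · have := pvBorder_getElem js h.1 hi h.2 (k := b) (by omega)
      rw [List.getElem?_eq_getElem hbl, List.getElem?_eq_getElem hi]
      have e : i + 1 - (b + 1) + b = i := by omega
      simp only [e] at this
      rw [this]
  · rintro ⟨hb, heq⟩
    have hb1 : b ≤ i - 1 := hb.1
    have hbl : b < js.length := by omega
    rw [List.getElem?_eq_getElem hbl, List.getElem?_eq_getElem hi] at heq
    have heq' := Option.some.inj heq
    apply pvBorder_of_getElem js (by omega) hi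
    intro k hk
    rcases Nat.lt_or_ge k b with hkb | hkb
    · have := pvBorder_getElem js hb.1 (by omega) hb.2 (k := k) hkb
      convert this using 2
      omega
    · have hkb' : k = b := by omega
      subst hkb'
      simp only [show i + 1 - (k + 1) + k = i from by omega]
      exact heq'

lemma pvBorder_succ' (js : List Char) {i b : Nat} (hi1 : 1 ≤ i) (hi : i < js.length)
    (hb : b ≤ i - 1) :
    PvBorder js i (b + 1) ↔ PvBorder js (i - 1) b ∧ js.getD b ' ' = js.getD i ' ' := by
  rw [pvBorder_succ js hi1 hi]
  have hbl : b < js.length := by omega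
  simp [List.getD, hbl, hi]

-- A's while loop descends the border chain to the longest matching border
lemma pvBorderWhile_spec (js : List Char) (ba : List Int) {i : Nat} (hi1 : 1 ≤ i)
    (hi : i < js.length) (hba : ∀ j, j < i → ba.getD j 0 = (pvMB js j : Int)) (ci : Char) :
    ∀ (fuel : Nat) (b : Nat), PvBorder js (i - 1) b → b ≤ fuel →
      (∀ b', PvBorder js (i - 1) b' → js.getD b' ' ' = ci → b' ≤ b) →
      ∃ r : Nat, pvBorderWhile js ba ci fuel (b : Int) = (r : Int) ∧ PvBorder js (i - 1) r ∧
        (∀ b', PvBorder js (i - 1) b' → js.getD b' ' ' = ci → b' ≤ r) ∧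
        (js.getD r ' ' ≠ ci → r = 0) := by
  intro fuel
  induction fuel with
  | zero =>
    intro b hb hble hmax
    refine ⟨b, rfl, hb, hmax, ?_⟩
    omega
  | succ fuel ih =>
    intro b hb hble hmax
    by_cases hg : (b : Int) > 0 ∧ PySem.List.pyGetD js (b : Int) ' ' ≠ ci
    · -- loop body
      have hbpos : 0 < b := by exact_mod_cast hg.1
      have hbi : b ≤ i - 1 := hb.1
      have hget : PySem.List.pyGetD ba ((b : Int) - 1) 0 = (pvMB js (b - 1) : Int) := by
        have : ((b : Int) - 1) = ((b - 1 : Nat) : Int) := by omega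
        rw [this, PySem.List.pyGetD_natCast]
        exact hba (b - 1) (by omega)
      have hmbb : PvBorder js (i - 1) (pvMB js (b - 1)) := by
        exact pvBorder_trans js hb (pvMB_border js (b - 1)) hbpos (by omega)
      have hmax' : ∀ b', PvBorder js (i - 1) b' → js.getD b' ' ' = ci → b' ≤ pvMB js (b - 1) := by
        intro b' hb' hc'
        have hble' : b' ≤ b := hmax b' hb' hc'
        have hne : b' ≠ b := by
          intro h; subst h
          apply hg.2
          rw [PySem.List.pyGetD_natCast]
          have : b' < js.length := by omega
          simpa [List.getD, this] using hc'
        have : PvBorder js (b - 1) b' := pvBorder_chain js hb' hb (by omega) (by omega)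
        exact le_pvMB js this
      have hstep : pvBorderWhile js ba ci (fuel + 1) (b : Int) =
          pvBorderWhile js ba ci fuel ((pvMB js (b - 1) : Nat) : Int) := by
        rw [pvBorderWhile, if_pos hg, hget]
      rw [hstep]
      exact ih (pvMB js (b - 1)) hmbb (by have := pvMB_le js (b - 1); omega) hmax'
    · -- exit
      have : pvBorderWhile js ba ci (fuel + 1) (b : Int) = (b : Int) := by
        rw [pvBorderWhile, if_neg hg]
      refine ⟨b, this, hb, hmax, ?_⟩
      intro hne
      by_contra hb0
      apply hg
      constructor
      · exact_mod_cast Nat.pos_of_ne_zero hb0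
      · rw [PySem.List.pyGetD_natCast]
        have hbl : b < js.length := by have := hb.1; omega
        simpa [List.getD, hbl] using hne

-- one step of A's loop stores exactly the longest border of js[:i+1]
lemma pvStep_eq_pvMB (js : List Char) (ba : List Int) {i : Nat} (hi1 : 1 ≤ i)
    (hi : i < js.length) (hba : ∀ j, j < i → ba.getD j 0 = (pvMB js j : Int)) :
    (let b := PySem.List.pyGetD ba ((i : Int) - 1) 0
     let ci := PySem.List.pyGetD js (i : Int) ' '
     let b := pvBorderWhile js ba ci b.toNat b
     if ci = PySem.List.pyGetD js b ' ' then (b + 1) else 0) = (pvMB js i : Int) := by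
  have hget : PySem.List.pyGetD ba ((i : Int) - 1) 0 = (pvMB js (i - 1) : Int) := by
    have : ((i : Int) - 1) = ((i - 1 : Nat) : Int) := by omega
    rw [this, PySem.List.pyGetD_natCast]
    exact hba (i - 1) (by omega)
  set ci := PySem.List.pyGetD js (i : Int) ' ' with hci
  have hcieq : ci = js.getD i ' ' := by rw [hci, PySem.List.pyGetD_natCast]
  have hmax0 : ∀ b', PvBorder js (i - 1) b' → js.getD b' ' ' = ci → b' ≤ pvMB js (i - 1) :=
    fun b' hb' _ => le_pvMB js hb'
  obtain ⟨r, hr, hrb, hrmax, hrmm⟩ :=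
    pvBorderWhile_spec js ba hi1 hi hba ci ((pvMB js (i - 1) : Int)).toNat (pvMB js (i - 1))
      (pvMB_border js (i - 1)) (by simp) hmax0
  simp only [hget, hr]
  by_cases hm : ci = PySem.List.pyGetD js (r : Int) ' '
  · rw [if_pos hm]
    have hmr : js.getD r ' ' = ci := by rw [hm, PySem.List.pyGetD_natCast]
    -- pvMB js i = r + 1
    have h1 : PvBorder js i (r + 1) := by
      rw [pvBorder_succ' js hi1 hi hrb.1]
      exact ⟨hrb, by rw [hmr, hcieq]⟩
    have h2 : pvMB js i ≤ r + 1 := by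
      rcases Nat.eq_zero_or_pos (pvMB js i) with h0 | hpos
      · omega
      · have hmb := pvMB_border js i
        obtain ⟨B, hB⟩ : ∃ B, pvMB js i = B + 1 := ⟨pvMB js i - 1, by omega⟩
        rw [hB] at hmb
        rw [pvBorder_succ' js hi1 hi (by have := hmb.1; omega)] at hmb
        have := hrmax B hmb.1 (by rw [hmb.2, ← hcieq])
        omega
    have h3 : r + 1 ≤ pvMB js i := le_pvMB js h1
    omega
  · rw [if_neg hm]
    have hmr : js.getD r ' ' ≠ ci := by
      intro h; apply hm; rw [PySem.List.pyGetD_natCast, ← h]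
    have hr0 : r = 0 := hrmm hmr
    -- no border of i is positive
    rcases Nat.eq_zero_or_pos (pvMB js i) with h0 | hpos
    · simp [h0]
    · exfalso
      have hmb := pvMB_border js i
      obtain ⟨B, hB⟩ : ∃ B, pvMB js i = B + 1 := ⟨pvMB js i - 1, by omega⟩
      rw [hB] at hmb
      rw [pvBorder_succ' js hi1 hi (by have := hmb.1; omega)] at hmb
      have hBle := hrmax B hmb.1 (by rw [hmb.2, ← hcieq])
      rw [hr0] at hBle
      have hB0 : B = 0 := by omega
      rw [hB0] at hmb
      apply hmr
      rw [hr0, hmb.2, hcieq]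

-- A's border-array loop computes pvMB at every position
lemma pvBA_loop (js : List Char) :
    ∀ (d i : Nat), i + d = js.length → 1 ≤ i → ∀ ba : List Int, ba.length = js.length →
      (∀ j, j < i → ba.getD j 0 = (pvMB js j : Int)) →
      ∀ j, j < js.length →
        ((PySem.List.pyRange (i : Int) (js.length : Int) 1).foldl (fun ba i =>
          let b := PySem.List.pyGetD ba (i - 1) 0
          let ci := PySem.List.pyGetD js i ' '
          let b := pvBorderWhile js ba ci b.toNat b
          if ci = PySem.List.pyGetD js b ' ' then PySem.List.pySetD ba i (b + 1)
          else PySem.List.pySetD ba i 0) ba).getD j 0 = (pvMB js j : Int) := by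
  intro d
  induction d with
  | zero =>
    intro i hd hi1 ba hlen hba j hj
    rw [PySem.List.pyRange_one_eq_nil (by omega)]
    simp only [List.foldl_nil]
    exact hba j (by omega)
  | succ d ih =>
    intro i hd hi1 ba hlen hba j hj
    rw [PySem.List.pyRange_one_cons (by omega : (i : Int) < (js.length : Int))]
    simp only [List.foldl_cons]
    have hstep := pvStep_eq_pvMB js ba hi1 (by omega) hba
    simp only at hstep
    -- the new array
    set b0 := PySem.List.pyGetD ba ((i : Int) - 1) 0 with hb0
    set ci := PySem.List.pyGetD js (i : Int) ' ' with hci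
    set r := pvBorderWhile js ba ci b0.toNat b0 with hrdef
    have harr : (if ci = PySem.List.pyGetD js r ' ' then PySem.List.pySetD ba (i : Int) (r + 1)
        else PySem.List.pySetD ba (i : Int) 0) =
        PySem.List.pySetD ba (i : Int) (if ci = PySem.List.pyGetD js r ' ' then r + 1 else 0) := by
      split_ifs <;> rfl
    have hval : (if ci = PySem.List.pyGetD js r ' ' then r + 1 else 0) = (pvMB js i : Int) := hstep
    rw [show ((i : Int) + 1) = ((i + 1 : Nat) : Int) from by omega]
    have hba' : ∀ j, j < i + 1 →
        ((if ci = PySem.List.pyGetD js r ' ' then PySem.List.pySetD ba (i : Int) (r + 1)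
          else PySem.List.pySetD ba (i : Int) 0)).getD j 0 = (pvMB js j : Int) := by
      intro j hji
      rw [harr, hval]
      have := PySem.List.pyGetD_pySetD_natCast ba i j ((pvMB js i : Int)) 0 (by omega)
      rw [PySem.List.pyGetD_natCast, PySem.List.pyGetD_natCast] at this
      rw [this]
      by_cases hji' : j = i
      · simp [hji']
      · rw [if_neg hji']
        exact hba j (by omega)
    have hlen' : ((if ci = PySem.List.pyGetD js r ' ' then PySem.List.pySetD ba (i : Int) (r + 1)
        else PySem.List.pySetD ba (i : Int) 0)).length = js.length := by
      split_ifs <;> simp [PySem.List.pySetD_natCast, hlen]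
    exact ih (i + 1) (by omega) (by omega) _ hlen' hba' j hj

-- B's slice comparison tests exactly the border property
lemma pvSlice_cond (js : List Char) {j b : Nat} (hb : b + 1 ≤ j) :
    (PySem.List.slice js (some 0) (some ((b : Int) + 1)) =
      PySem.List.slice js (some ((j : Int) - ((b : Int) + 1) + 1)) (some ((j : Int) + 1))) ↔
    PvBorder js j (b + 1) := by
  have e1 : ((b : Int) + 1) = ((b + 1 : Nat) : Int) := by omega
  have e2 : ((j : Int) - (((b + 1 : Nat) : Int)) + 1) = ((j - b : Nat) : Int) := by push_cast; omega
  have e3 : ((j : Int) + 1) = ((j + 1 : Nat) : Int) := by omega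
  rw [e1, e2, e3, PySem.List.slice_zero_start, PySem.List.slice_to_natCast,
    PySem.List.slice_natCast]
  unfold PvBorder
  have e4 : j + 1 - (j - b) = b + 1 := by omega
  have e5 : j + 1 - (b + 1) = j - b := by omega
  rw [e4, e5]
  constructor
  · exact fun h => ⟨hb, h⟩
  · exact fun h => h.2

-- B's downward scan finds the greatest border length
lemma pvLongestBorderGo_eq (js : List Char) {j : Nat} :
    ∀ b : Nat, b ≤ j → pvLongestBorderGo js (j : Int) b = (Nat.findGreatest (PvBorder js j) b : Int) := by
  intro b
  induction b with
  | zero => intro _; simp [pvLongestBorderGo]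
  | succ b ih =>
    intro hb
    rw [pvLongestBorderGo, Nat.findGreatest_succ]
    by_cases h : PvBorder js j (b + 1)
    · rw [if_neg (by rw [ne_eq, not_not, pvSlice_cond js hb]; exact h), if_pos h]
      omega
    · rw [if_pos (by rw [ne_eq, pvSlice_cond js hb]; exact h), if_neg h]
      exact ih (by omega)

lemma pv_longest_border_eq (js : List Char) (j : Nat) :
    pv_longest_border js (j : Int) = (pvMB js j : Int) := by
  unfold pv_longest_border pvMB
  rw [show ((j : Int)).toNat = j from by omega]
  exact pvLongestBorderGo_eq js j le_rfl

-- the two matchers return the same position list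
lemma pv_border_algo_eq (x p : List Char) : pv_border_algo x p = pv_lin_match x p := by
  unfold pv_border_algo pv_lin_match
  by_cases h : p = [] ∨ x = []
  · rw [if_pos h, if_pos h]
  · rw [if_neg h, if_neg h]
    push_neg at h
    have hp : 0 < p.length := List.length_pos_iff.mpr h.1
    have hx : 0 < x.length := List.length_pos_iff.mpr h.2
    set js := p ++ '$' :: x with hjs
    have hjoin : PySem.Chars.join ['$'] [p, x] = js := by
      rw [PySem.Chars.join_cons_cons, PySem.Chars.join_singleton]
      simp [hjs]
    rw [hjoin]
    dsimp only
    have hn : js.length = p.length + 1 + x.length := by simp [hjs]; omega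
    have hba := pvBA_loop js (js.length - 1) 1 (by omega) le_rfl
      (List.replicate js.length 0) (by simp)
      (by intro j hj
          have : j = 0 := by omega
          subst this
          simp [List.getD, pvMB, show 0 < js.length from by omega])
    simp only [Nat.cast_one] at hba
    -- rewrite A's filter loop into filter/map over the same range
    rw [PySem.List.foldl_append_ite (p := fun i => PySem.List.pyGetD _ (i + (p.length : Int) + 1) 0 = (p.length : Int)) (f := fun i => i - (p.length : Int) + 2)]
    rw [List.nil_append]
    -- both ranges are List.range x.length reindexed
    rw [PySem.List.pyRange_one 0 (x.length : Int), PySem.List.pyRange_one ((p.length : Int) + 1) (js.length : Int)]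
    rw [show ((x.length : Int) - 0).toNat = x.length from by omega,
        show ((js.length : Int) - ((p.length : Int) + 1)).toNat = x.length from by omega]
    rw [List.filter_map, List.filter_map, List.map_map, List.map_map]
    refine Eq.trans (Eq.trans ?_ (rfl :
        (List.map (fun k : Nat => (k : Int) - (p.length : Int) + 2)
          (List.filter (fun k => decide (pvMB js (k + p.length + 1) = p.length))
            (List.range x.length))) = _)) ?_
    · rw [List.filter_congr (q := fun k => decide (pvMB js (k + p.length + 1) = p.length))
        (by intro k hk
            have hkx : k < x.length := List.mem_range.mp hk
            simp only [Function.comp]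
            have e : ((0 : Int) + (k : Nat) + (p.length : Int) + 1) = ((k + p.length + 1 : Nat) : Int) := by push_cast; omega
            rw [e, PySem.List.pyGetD_natCast, hba (k + p.length + 1) (by omega)]
            simp)]
      apply List.map_congr_left
      intro k hk
      simp only [Function.comp]
      push_cast
      ring
    · symm
      rw [List.filter_congr (q := fun k => decide (pvMB js (k + p.length + 1) = p.length))
        (by intro k hk
            have hkx : k < x.length := List.mem_range.mp hk
            simp only [Function.comp]
            have e : ((p.length : Int) + 1 + (k : Nat)) = ((k + p.length + 1 : Nat) : Int) := by push_cast; omega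
            simp only [e, pv_longest_border_eq js (k + p.length + 1)]
            simp)]
      apply List.map_congr_left
      intro k hk
      simp only [Function.comp]
      push_cast
      ring

-- joining on the empty separator is flattening
lemma pvJoin_nil_eq_flatten (parts : List (List Char)) :
    PySem.Chars.join [] parts = parts.flatten := by
  unfold PySem.Chars.join
  induction parts with
  | nil => rfl
  | cons a t ih =>
    cases t with
    | nil => simp [List.intercalate]
    | cons b t2 =>
      rw [List.flatten_cons, ← ih]
      simp [List.intercalate, List.intersperse]

lemma pvFlatten_flatMap {α : Type} (l : List α) (f : α → List (List Char)) :
    (l.flatMap f).flatten = l.flatMap (fun x => (f x).flatten) := by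
  induction l with
  | nil => rfl
  | cons a t ih => simp [List.flatMap_cons, ih]

theorem lin_runner_eq (fasta_dict fastq_dict : List (String × String)) :
    lin_runner fasta_dict fastq_dict = lin_runner_alt fasta_dict fastq_dict := by
  unfold lin_runner lin_runner_alt
  dsimp only
  apply congrArg String.ofList
  set fasta := PySem.Dict.ofList fasta_dict
  set fastq := PySem.Dict.ofList fastq_dict
  rw [pvJoin_nil_eq_flatten, pvFlatten_flatMap]
  have hinner : ∀ (pkv xkv : String × String) (s : List Char),
      (pv_border_algo xkv.2.toList pkv.2.toList).foldl (fun s i =>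
        s ++ pv_output xkv.1.toList pkv.1.toList i pkv.2.toList ++ ['\n']) s =
      s ++ (pv_border_algo xkv.2.toList pkv.2.toList).flatMap (fun i =>
        pv_output xkv.1.toList pkv.1.toList i pkv.2.toList ++ ['\n']) := by
    intro pkv xkv s
    rw [PySem.List.foldl_congr_mem _ _
      (fun s i => s ++ (pv_output xkv.1.toList pkv.1.toList i pkv.2.toList ++ ['\n'])) _
      (by intro acc x _; simp)]
    exact PySem.List.foldl_append_eq_flatMap _ _ _
  have hmid : ∀ (pkv : String × String) (s : List Char),
      (fasta.items).foldl (fun s xkv =>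
        (pv_border_algo xkv.2.toList pkv.2.toList).foldl (fun s i =>
          s ++ pv_output xkv.1.toList pkv.1.toList i pkv.2.toList ++ ['\n']) s) s =
      s ++ (fasta.items).flatMap (fun xkv =>
        (pv_border_algo xkv.2.toList pkv.2.toList).flatMap (fun i =>
          pv_output xkv.1.toList pkv.1.toList i pkv.2.toList ++ ['\n'])) := by
    intro pkv s
    rw [PySem.List.foldl_congr_mem _ _
      (fun s xkv => s ++ (pv_border_algo xkv.2.toList pkv.2.toList).flatMap (fun i =>
        pv_output xkv.1.toList pkv.1.toList i pkv.2.toList ++ ['\n'])) _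
      (by intro acc x _; exact hinner pkv x acc)]
    exact PySem.List.foldl_append_eq_flatMap _ _ _
  rw [PySem.List.foldl_congr_mem _ _
    (fun s pkv => s ++ (fasta.items).flatMap (fun xkv =>
      (pv_border_algo xkv.2.toList pkv.2.toList).flatMap (fun i =>
        pv_output xkv.1.toList pkv.1.toList i pkv.2.toList ++ ['\n']))) _
    (by intro acc x _; exact hmid x acc)]
  rw [PySem.List.foldl_append_eq_flatMap, List.nil_append]
  apply List.flatMap_congr
  intro pkv _
  rw [pvFlatten_flatMap]
  apply List.flatMap_congr
  intro xkv _
  rw [← List.flatMap_def, pv_border_algo_eq]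
  apply List.flatMap_congr
  intro i _
  rfl

-- ===== VERDICT (by name: the statement is the Claim_ definition above) =====
theorem lin_runner_spec : Claim_equal_lin_runner := by
  intro fasta_dict fastq_dict _
  unfold Spec_lin_runner
  exact lin_runner_eq fasta_dict fastq_dict
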